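-- pv_equiv track=rewrite | github.com/OscarYau525/DAP-BERT | arch_helper.py | count_arch_size
-- ===== SOURCE A (Python) =====
-- def count_arch_size(archs):
--     def summingemb(arch):
--         ret_sum = 0
--         for layer_arch in arch:
--             ret_sum += sum([len(qkv_arch)for qkv_arch in layer_arch])
--         return ret_sum
--     def summing(arch):
--         ret_sum = 0
--         for layer_arch in arch:
--             for head_arch in layer_arch:
--                 ret_sum += sum([len(qkv_arch)for qkv_arch in head_arch])
--         return ret_sum
--
--     embedding_arch, qkv_head_arch, intermediate_arch, multihead_arch, sc_arch = archs
--     emb_sum = 0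
--     qkv_head_sum = 0
--     inter_sum = 0
--     head_sum = 0
--     sc_sum = 0
--     if embedding_arch != None:
--         emb_sum = summingemb(embedding_arch)
--     if qkv_head_arch != None:
--         qkv_head_sum = summing(qkv_head_arch)
--     if intermediate_arch != None:
--         inter_sum = sum([len(layer_arch)for layer_arch in intermediate_arch])
--     if multihead_arch != None:
--         head_sum = sum([len(layer_arch)for layer_arch in multihead_arch])
--     if sc_arch != None:
--         sc_sum = sum([len(layer_arch)for layer_arch in sc_arch])
--     return emb_sum, qkv_head_sum, inter_sum, head_sum, sc_sum
-- ===== SOURCE B (Python) =====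
-- def count_arch_size(archs):
--     def depth_sum(arch, depth):
--         if depth == 0:
--             return len(arch)
--         return sum(depth_sum(x, depth - 1) for x in arch)
--
--     emb, qkv, inter, multi, sc = archs
--     return (
--         depth_sum(emb, 2) if emb is not None else 0,
--         depth_sum(qkv, 3) if qkv is not None else 0,
--         depth_sum(inter, 1) if inter is not None else 0,
--         depth_sum(multi, 1) if multi is not None else 0,
--         depth_sum(sc, 1) if sc is not None else 0,
--     )
-- ===== Notes on version B (the rewrite author's own statement) =====
-- stated objective: simpler
-- what changed: Replaced the two bespoke nested-loop helpers and three inline comprehensions with a single depth-parameterized recursive helper called at depths 2/3/1/1/1, and the guard-and-accumulator sequence with a conditional-expression tuple.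
import Mathlib
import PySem

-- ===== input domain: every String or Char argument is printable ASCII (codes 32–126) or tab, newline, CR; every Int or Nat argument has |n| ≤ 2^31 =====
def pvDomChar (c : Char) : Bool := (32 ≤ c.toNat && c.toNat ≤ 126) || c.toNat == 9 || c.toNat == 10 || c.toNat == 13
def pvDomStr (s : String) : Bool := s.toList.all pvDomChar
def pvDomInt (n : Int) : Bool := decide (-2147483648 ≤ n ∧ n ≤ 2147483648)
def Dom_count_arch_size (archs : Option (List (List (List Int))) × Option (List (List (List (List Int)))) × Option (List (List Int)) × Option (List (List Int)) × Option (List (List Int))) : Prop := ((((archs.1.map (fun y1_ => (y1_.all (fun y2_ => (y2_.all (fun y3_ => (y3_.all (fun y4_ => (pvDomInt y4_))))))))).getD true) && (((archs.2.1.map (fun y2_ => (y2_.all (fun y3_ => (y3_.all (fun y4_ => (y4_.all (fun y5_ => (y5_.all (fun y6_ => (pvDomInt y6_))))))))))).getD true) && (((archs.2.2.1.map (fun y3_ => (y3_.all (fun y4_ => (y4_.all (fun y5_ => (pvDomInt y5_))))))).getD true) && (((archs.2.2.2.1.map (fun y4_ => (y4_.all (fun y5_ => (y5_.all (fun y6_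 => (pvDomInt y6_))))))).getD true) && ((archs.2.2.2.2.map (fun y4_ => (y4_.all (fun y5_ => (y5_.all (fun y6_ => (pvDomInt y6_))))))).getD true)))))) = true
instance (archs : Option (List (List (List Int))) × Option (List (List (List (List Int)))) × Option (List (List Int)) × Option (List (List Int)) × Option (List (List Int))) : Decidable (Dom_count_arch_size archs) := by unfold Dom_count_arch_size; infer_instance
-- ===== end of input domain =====

-- B replaces A's two bespoke nested-loop helpers and three inline comprehensions with one
-- depth-parameterized recursive sum (unrolled by level in Lean because the list types differ);
-- objective: simpler decomposition, same cost.

-- ===== PORT A =====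
-- helper summingemb: accumulator loop over layers, inner comprehension of lengths
def pvSummingemb (arch : List (List (List Int))) : Int :=
  arch.foldl (fun ret_sum layer_arch =>
    ret_sum + (layer_arch.map (fun qkv_arch => (qkv_arch.length : Int))).sum) 0

-- helper summing: two nested accumulator loops, inner comprehension of lengths
def pvSumming (arch : List (List (List (List Int)))) : Int :=
  arch.foldl (fun ret_sum layer_arch =>
    layer_arch.foldl (fun s head_arch =>
      s + (head_arch.map (fun qkv_arch => (qkv_arch.length : Int))).sum) ret_sum) 0

def count_arch_size (archs : Option (List (List (List Int))) × Option (List (List (List (List Int)))) × Option (List (List Int)) × Option (List (List Int)) × Option (List (List Int))) : Int × Int × Int × Int × Int :=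
  let embedding_arch := archs.1
  let qkv_head_arch := archs.2.1
  let intermediate_arch := archs.2.2.1
  let multihead_arch := archs.2.2.2.1
  let sc_arch := archs.2.2.2.2
  let emb_sum : Int := 0
  let qkv_head_sum : Int := 0
  let inter_sum : Int := 0
  let head_sum : Int := 0
  let sc_sum : Int := 0
  let emb_sum := match embedding_arch with
    | some a => pvSummingemb a
    | none => emb_sum
  let qkv_head_sum := match qkv_head_arch with
    | some a => pvSumming a
    | none => qkv_head_sum
  let inter_sum := match intermediate_arch with
    | some a => (a.map (fun layer_arch => (layer_arch.length : Int))).sum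
    | none => inter_sum
  let head_sum := match multihead_arch with
    | some a => (a.map (fun layer_arch => (layer_arch.length : Int))).sum
    | none => head_sum
  let sc_sum := match sc_arch with
    | some a => (a.map (fun layer_arch => (layer_arch.length : Int))).sum
    | none => sc_sum
  (emb_sum, qkv_head_sum, inter_sum, head_sum, sc_sum)

-- ===== PORT B =====
-- depth_sum(arch, depth): depth 0 → len; depth k+1 → sum of depth_sum at depth k over elements.
-- The depth recursion is unrolled per level since each level has a different list type.
def pvDepth0 {α : Type} (xs : List α) : Int := xs.length
def pvDepth1 {α : Type} (xs : List (List α)) : Int := (xs.map (fun x => pvDepth0 x)).sum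
def pvDepth2 {α : Type} (xs : List (List (List α))) : Int := (xs.map (fun x => pvDepth1 x)).sum
def pvDepth3 {α : Type} (xs : List (List (List (List α)))) : Int := (xs.map (fun x => pvDepth2 x)).sum

def count_arch_size_alt (archs : Option (List (List (List Int))) × Option (List (List (List (List Int)))) × Option (List (List Int)) × Option (List (List Int)) × Option (List (List Int))) : Int × Int × Int × Int × Int :=
  ((match archs.1 with | some a => pvDepth2 a | none => 0),
   (match archs.2.1 with | some a => pvDepth3 a | none => 0),
   (match archs.2.2.1 with | some a => pvDepth1 a | none => 0),
   (match archs.2.2.2.1 with | some a => pvDepth1 a | none => 0),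
   (match archs.2.2.2.2 with | some a => pvDepth1 a | none => 0))

-- ===== PRECONDITION & SPEC =====
def Spec_count_arch_size (archs : Option (List (List (List Int))) × Option (List (List (List (List Int)))) × Option (List (List Int)) × Option (List (List Int)) × Option (List (List Int))) (out : Int × Int × Int × Int × Int) : Prop := out = count_arch_size_alt archs
instance (archs : Option (List (List (List Int))) × Option (List (List (List (List Int)))) × Option (List (List Int)) × Option (List (List Int)) × Option (List (List Int))) (out : Int × Int × Int × Int × Int) : Decidable (Spec_count_arch_size archs out) := by unfold Spec_count_arch_size; infer_instance

-- ===== CLAIM (what is proved, stated in full; the proofs are below) =====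
def Claim_equal_count_arch_size : Prop := ∀ (archs : Option (List (List (List Int))) × Option (List (List (List (List Int)))) × Option (List (List Int)) × Option (List (List Int)) × Option (List (List Int))), Dom_count_arch_size archs → Spec_count_arch_size archs (count_arch_size archs)

-- ===== LEMMAS AND PROOFS =====
theorem foldl_add_map {α : Type} (f : α → Int) (l : List α) (init : Int) :
    l.foldl (fun a x => a + f x) init = init + (l.map f).sum := by
  induction l generalizing init with
  | nil => simp
  | cons hd tl ih => simp [ih]; ring

theorem summingemb_eq (arch : List (List (List Int))) : pvSummingemb arch = pvDepth2 arch := by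
  simp [pvSummingemb, foldl_add_map, pvDepth2, pvDepth1, pvDepth0]

theorem summing_eq (arch : List (List (List (List Int)))) : pvSumming arch = pvDepth3 arch := by
  simp [pvSumming, foldl_add_map, pvDepth3, pvDepth2, pvDepth1, pvDepth0]

theorem sum_len_eq {α : Type} (a : List (List α)) :
    (a.map (fun layer_arch => (layer_arch.length : Int))).sum = pvDepth1 a := by
  simp [pvDepth1, pvDepth0]

-- ===== VERDICT (by name: the statement is the Claim_ definition above) =====
theorem count_arch_size_spec : Claim_equal_count_arch_size := by
  intro archs _
  obtain ⟨e, q, i, m, s⟩ := archs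
  unfold Spec_count_arch_size count_arch_size count_arch_size_alt
  cases e <;> cases q <;> cases i <;> cases m <;> cases s <;>
    simp [summingemb_eq, summing_eq, sum_len_eq]
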